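-- pv_equiv track=rewrite | github.com/SuperCowPowers/workbench | src/sageworks/web_components/violin_plots.py | _compute_subplot_layout
-- ===== SOURCE A (Python) =====
-- import math
--
-- def _compute_subplot_layout(n):
--     """Internal method to compute a 'nice' layout for a given number of subplots
--     Args:
--         n (int): The total number of subplots.
--     Returns:
--         tuple: A tuple (rows, cols) representing the layout.
--     Logic:
--         We're aiming for a rectangular grid of plots with max columns = 8
--     """
--
--     # Start with a single row
--     rows = 1
--     while True:
--         cols = math.ceil(n / rows)
--         if cols <= 8:
--             return int(rows), int(cols)
--         else:
--             rows += 1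
-- ===== SOURCE B (Python) =====
-- import math
--
-- def _compute_subplot_layout(n):
--     # Closed form: the smallest rows >= 1 with ceil(n/rows) <= 8 is max(1, ceil(n/8)).
--     rows = max(1, math.ceil(n / 8))
--     cols = math.ceil(n / rows)
--     return int(rows), int(cols)
-- ===== Notes on version B (the rewrite author's own statement) =====
-- stated objective: simpler
-- what changed: Replaces the incremental while-loop search for the row count with the closed form rows = max(1, ceil(n/8)), cols = ceil(n/rows).
import Mathlib
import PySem

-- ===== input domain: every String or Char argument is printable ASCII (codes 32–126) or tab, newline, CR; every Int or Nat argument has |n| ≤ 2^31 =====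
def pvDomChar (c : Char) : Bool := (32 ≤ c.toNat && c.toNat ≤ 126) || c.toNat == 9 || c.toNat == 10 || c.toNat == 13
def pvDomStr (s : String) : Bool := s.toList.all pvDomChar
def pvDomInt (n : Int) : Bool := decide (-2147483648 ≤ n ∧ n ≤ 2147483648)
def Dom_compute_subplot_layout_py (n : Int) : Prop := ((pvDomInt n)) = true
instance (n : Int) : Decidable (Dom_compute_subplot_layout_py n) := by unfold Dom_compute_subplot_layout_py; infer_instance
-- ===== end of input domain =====

-- B replaces A's incremental while-loop search for the row count by the closed form
-- rows = max(1, ceil(n/8)), cols = ceil(n/rows); same return value, no iteration.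


-- ===== PORT A =====
-- math.ceil(n / d): exact integer ceiling division for |n| ≤ 2^31 (the float quotient is
-- accurate to well under 1/d there), ported as -((-n) // d).
def pyCeilDiv (n d : Int) : Int := -(PySem.Int.floordiv (-n) d)

-- ceiling-division bracket, cited by the loop's decreasing_by: for d > 0, ⌈n/d⌉ ≤ c ↔ n ≤ c·d
theorem pyCeilDiv_le_iff (n d c : Int) (hd : 0 < d) : pyCeilDiv n d ≤ c ↔ n ≤ c * d := by
  unfold pyCeilDiv
  rw [neg_le, PySem.Int.le_floordiv_iff_mul_le hd]
  constructor <;> intro h <;> linarith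

-- the 'while True' loop of A; rows = k + 1, k counts the increments
def computeLayoutLoop (n : Int) (k : Nat) : Int × Int :=
  let rows : Int := (k : Int) + 1
  let cols := pyCeilDiv n rows
  if cols ≤ 8 then (rows, cols)
  else computeLayoutLoop n (k + 1)
termination_by n.toNat - k
decreasing_by
  rename_i h
  rw [pyCeilDiv_le_iff _ _ _ (by omega : (0:Int) < (k:Int) + 1)] at h
  omega

def compute_subplot_layout_py (n : Int) : Int × Int := computeLayoutLoop n 0

-- ===== PORT B =====
def compute_subplot_layout_py_alt (n : Int) : Int × Int :=
  let rows := max 1 (pyCeilDiv n 8)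
  let cols := pyCeilDiv n rows
  (rows, cols)

-- ===== PRECONDITION & SPEC =====
def Spec_compute_subplot_layout_py (n : Int) (out : Int × Int) : Prop := out = compute_subplot_layout_py_alt n
instance (n : Int) (out : Int × Int) : Decidable (Spec_compute_subplot_layout_py n out) := by unfold Spec_compute_subplot_layout_py; infer_instance

-- ===== CLAIM (what is proved, stated in full; the proofs are below) =====
def Claim_equal_compute_subplot_layout_py : Prop := ∀ (n : Int), Dom_compute_subplot_layout_py n → Spec_compute_subplot_layout_py n (compute_subplot_layout_py n)

-- ===== LEMMAS AND PROOFS =====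

-- the loop, started at any rows = k+1 ≤ R := max 1 ⌈n/8⌉, stops exactly at rows = R
theorem computeLayoutLoop_eq (n : Int) (m k : Nat)
    (hm : (k : Int) + 1 + (m : Int) = max 1 (pyCeilDiv n 8)) :
    computeLayoutLoop n k = compute_subplot_layout_py_alt n := by
  induction m generalizing k with
  | zero =>
      rw [computeLayoutLoop.eq_def]
      simp only [Int.natCast_zero, add_zero] at hm
      have hcols : pyCeilDiv n ((k : Int) + 1) ≤ 8 := by
        rw [pyCeilDiv_le_iff _ _ _ (by omega : (0:Int) < (k:Int) + 1)]
        by_cases hc : pyCeilDiv n 8 ≤ 1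
        · have := (pyCeilDiv_le_iff n 8 1 (by omega)).mp hc
          omega
        · have := (pyCeilDiv_le_iff n 8 (pyCeilDiv n 8) (by omega)).mp le_rfl
          omega
      simp only [hcols, if_true]
      simp only [compute_subplot_layout_py_alt, hm]
  | succ m ih =>
      rw [computeLayoutLoop.eq_def]
      have h1 : ¬ pyCeilDiv n 8 ≤ (k : Int) + 1 := by push_cast at hm; omega
      rw [pyCeilDiv_le_iff _ _ _ (by omega : (0:Int) < 8)] at h1
      have hgt : ¬ pyCeilDiv n ((k : Int) + 1) ≤ 8 := by
        rw [pyCeilDiv_le_iff _ _ _ (by omega : (0:Int) < (k:Int) + 1)]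
        omega
      simp only [hgt, if_false]
      exact ih (k + 1) (by push_cast at hm ⊢; omega)

-- ===== VERDICT (by name: the statement is the Claim_ definition above) =====
theorem compute_subplot_layout_py_spec : Claim_equal_compute_subplot_layout_py := by
  intro n _
  unfold Spec_compute_subplot_layout_py compute_subplot_layout_py
  have h1 : (1 : Int) ≤ max 1 (pyCeilDiv n 8) := le_max_left _ _
  exact computeLayoutLoop_eq n (max 1 (pyCeilDiv n 8) - 1).toNat 0 (by push_cast; omega)
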